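-- pv_equiv track=rewrite | github.com/waelchabir/Adjacent_Values | code/closest.py | getClosestAdjacent
-- ===== SOURCE A (Python) =====
-- def getDistance(x, y):
--     distance = x - y
--     if (distance >= 0):
--         return int(distance)
--     return (-1) * int(distance)
--
-- def getClosestAdjacent(A, startIndice):
--     nextIndice = startIndice + 1
--     adjacentList = []
--     for i in range(nextIndice, len(A)):
--         if (A[startIndice] != A[i]):
--             isAdjacent = True
--             for j in range(len(A)):
--                 if A[startIndice] < A[i]:
--                     if ((A[startIndice] < A[j] < A[i]) and (A[startIndice] != A[j])) and (j != i) and (j != startIndice):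
--                         isAdjacent = False
--                 if ((A[startIndice] > A[j] > A[i]) and (A[startIndice] != A[j])) and (j != i) and (j != startIndice):
--                         isAdjacent = False
--             if isAdjacent:
--                 adjacentList.append(str(startIndice) + ',' + str(i) + ',' + str(getDistance(startIndice, i)))
--     return adjacentList
-- ===== SOURCE B (Python) =====
-- def getClosestAdjacent(A, startIndice):
--     # One pass to find the only two candidate "adjacent" values (nearest value
--     # above and nearest value below A[startIndice]), then one pass to emit matches.
--     n = len(A)
--     if startIndice + 1 >= n:
--         return []
--     v = A[startIndice]
--     up = min((x for x in A if x > v), default=None)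
--     down = max((x for x in A if x < v), default=None)
--     return [str(startIndice) + ',' + str(i) + ',' + str(abs(startIndice - i))
--             for i in range(startIndice + 1, n)
--             if A[i] == up or A[i] == down]
-- ===== Notes on version B (the rewrite author's own statement) =====
-- stated objective: faster
-- what changed: Instead of re-scanning the whole list for every later index to test 'no value strictly between', B computes in one pass the nearest value above and the nearest value below A[startIndice]; a later index is adjacent iff its value equals one of these two, so a single pass emits the result.
import Mathlib
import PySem

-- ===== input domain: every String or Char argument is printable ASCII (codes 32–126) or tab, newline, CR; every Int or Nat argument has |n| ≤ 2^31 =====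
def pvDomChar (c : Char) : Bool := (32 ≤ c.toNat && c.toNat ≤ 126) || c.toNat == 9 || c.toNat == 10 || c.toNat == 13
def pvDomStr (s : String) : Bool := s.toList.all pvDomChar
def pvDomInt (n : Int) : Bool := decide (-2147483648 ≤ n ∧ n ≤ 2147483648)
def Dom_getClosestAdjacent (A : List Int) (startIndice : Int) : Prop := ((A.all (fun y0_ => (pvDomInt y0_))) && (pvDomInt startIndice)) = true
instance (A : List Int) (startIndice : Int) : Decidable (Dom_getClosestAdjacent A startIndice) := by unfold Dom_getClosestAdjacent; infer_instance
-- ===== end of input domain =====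

-- B replaces A's quadratic per-index rescan by one pass computing the nearest value above
-- and below A[startIndice], then a single matching pass (faster: asymptotic, O(n^2) -> O(n)).

-- ===== PORT A =====
def getDistance (x y : Int) : Int :=
  let distance := x - y
  if distance ≥ 0 then distance else (-1) * distance

def getClosestAdjacent (A : List Int) (startIndice : Int) : List String :=
  let nextIndice := startIndice + 1
  (PySem.List.pyRange nextIndice (A.length : Int) 1).foldl (fun adjacentList i =>
    if PySem.List.pyGetD A startIndice 0 ≠ PySem.List.pyGetD A i 0 then
      let isAdjacent := (PySem.List.pyRange 0 (A.length : Int) 1).foldl (fun isAdjacent j =>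
        let isAdjacent :=
          if PySem.List.pyGetD A startIndice 0 < PySem.List.pyGetD A i 0 then
            if ((PySem.List.pyGetD A startIndice 0 < PySem.List.pyGetD A j 0 ∧
                 PySem.List.pyGetD A j 0 < PySem.List.pyGetD A i 0) ∧
                PySem.List.pyGetD A startIndice 0 ≠ PySem.List.pyGetD A j 0) ∧
               j ≠ i ∧ j ≠ startIndice then false else isAdjacent
          else isAdjacent
        if ((PySem.List.pyGetD A startIndice 0 > PySem.List.pyGetD A j 0 ∧
             PySem.List.pyGetD A j 0 > PySem.List.pyGetD A i 0) ∧
            PySem.List.pyGetD A startIndice 0 ≠ PySem.List.pyGetD A j 0) ∧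
           j ≠ i ∧ j ≠ startIndice then false else isAdjacent) true
      if isAdjacent then
        adjacentList ++ [PySem.Int.toStr startIndice ++ "," ++ PySem.Int.toStr i ++ "," ++
                         PySem.Int.toStr (getDistance startIndice i)]
      else adjacentList
    else adjacentList) []

-- ===== PORT B =====
def getClosestAdjacent_alt (A : List Int) (startIndice : Int) : List String :=
  let n : Int := (A.length : Int)
  if startIndice + 1 ≥ n then []
  else
    let v := PySem.List.pyGetD A startIndice 0
    let up := PySem.List.min? (A.filter (fun x => v < x)) (fun x => x)
    let down := PySem.List.max? (A.filter (fun x => x < v)) (fun x => x)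
    ((PySem.List.pyRange (startIndice + 1) n 1).filter
        (fun i => decide (some (PySem.List.pyGetD A i 0) = up) ||
                  decide (some (PySem.List.pyGetD A i 0) = down))).map
      (fun i => PySem.Int.toStr startIndice ++ "," ++ PySem.Int.toStr i ++ "," ++
                PySem.Int.toStr |startIndice - i|)

-- ===== PRECONDITION & SPEC =====
-- Pre_ excludes exactly the inputs on which Python A raises IndexError
-- (startIndice < -len(A) while the loop range is nonempty); Python B raises there too.
def Pre_getClosestAdjacent (A : List Int) (startIndice : Int) : Prop :=
  -(A.length : Int) ≤ startIndice ∨ (A.length : Int) ≤ startIndice + 1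
instance (A : List Int) (startIndice : Int) : Decidable (Pre_getClosestAdjacent A startIndice) := by
  unfold Pre_getClosestAdjacent; infer_instance
def pvWitness_getClosestAdjacent : List Int × Int := ([1, 3, 2, 7], 0)
def Spec_getClosestAdjacent (A : List Int) (startIndice : Int) (out : List String) : Prop := out = getClosestAdjacent_alt A startIndice
instance (A : List Int) (startIndice : Int) (out : List String) : Decidable (Spec_getClosestAdjacent A startIndice out) := by unfold Spec_getClosestAdjacent; infer_instance

-- ===== CLAIM (what is proved, stated in full; the proofs are below) =====
def Claim_equal_getClosestAdjacent : Prop := ∀ (A : List Int) (startIndice : Int), Dom_getClosestAdjacent A startIndice → Pre_getClosestAdjacent A startIndice → Spec_getClosestAdjacent A startIndice (getClosestAdjacent A startIndice)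

-- ===== LEMMAS AND PROOFS =====

-- latch fold characterization
lemma pv_latch (c : Prop) [Decidable c] (P1 P2 : Int → Prop) [DecidablePred P1] [DecidablePred P2] :
    ∀ (l : List Int) (b : Bool),
      l.foldl (fun b j =>
        if P2 j then false else if c then (if P1 j then false else b) else b) b
      = (b && l.all (fun j => !decide ((c ∧ P1 j) ∨ P2 j))) := by
  intro l
  induction l with
  | nil => intro b; simp
  | cons x t ih =>
    intro b
    simp only [List.foldl_cons, List.all_cons, ih]
    by_cases h2 : P2 x <;> by_cases hc : c <;> by_cases h1 : P1 x <;>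
      simp [h2, hc, h1]

lemma pv_adjacent_iff_up (A : List Int) (v vi : Int) (hvi : vi ∈ A) (hlt : v < vi) :
    (∀ x ∈ A, ¬(v < x ∧ x < vi)) ↔
      PySem.List.min? (A.filter fun x => decide (v < x)) (fun x => x) = some vi := by
  constructor
  · intro h
    have hviF : vi ∈ A.filter (fun x => decide (v < x)) := by
      simp [List.mem_filter, hvi, hlt]
    obtain ⟨m, hm⟩ : ∃ m, PySem.List.min? (A.filter fun x => decide (v < x)) (fun x => x) = some m := by
      rcases hmo : PySem.List.min? (A.filter fun x => decide (v < x)) (fun x => x) with _ | m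
      · rw [PySem.List.min?_eq_none_iff] at hmo
        rw [hmo] at hviF; simp at hviF
      · exact ⟨m, rfl⟩
    have hmem := PySem.List.min?_mem hm
    have hmin := PySem.List.min?_isMin hm
    have hmvi : m ≤ vi := hmin vi hviF
    have hmA : m ∈ A := (List.mem_filter.mp hmem).1
    have hvm : v < m := by have := (List.mem_filter.mp hmem).2; simpa using this
    have : ¬ (v < m ∧ m < vi) := h m hmA
    have : vi ≤ m := by omega
    have : m = vi := le_antisymm hmvi this
    rw [hm, this]
  · intro h x hx hbx
    have := PySem.List.min?_isMin h x (by simp [List.mem_filter, hx, hbx.1])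
    simp at this
    omega

lemma pv_adjacent_iff_down (A : List Int) (v vi : Int) (hvi : vi ∈ A) (hlt : vi < v) :
    (∀ x ∈ A, ¬(vi < x ∧ x < v)) ↔
      PySem.List.max? (A.filter fun x => decide (x < v)) (fun x => x) = some vi := by
  constructor
  · intro h
    have hviF : vi ∈ A.filter (fun x => decide (x < v)) := by
      simp [List.mem_filter, hvi, hlt]
    obtain ⟨m, hm⟩ : ∃ m, PySem.List.max? (A.filter fun x => decide (x < v)) (fun x => x) = some m := by
      rcases hmo : PySem.List.max? (A.filter fun x => decide (x < v)) (fun x => x) with _ | m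
      · rw [PySem.List.max?_eq_none_iff] at hmo
        rw [hmo] at hviF; simp at hviF
      · exact ⟨m, rfl⟩
    have hmem := PySem.List.max?_mem hm
    have hmax := PySem.List.max?_isMax hm
    have hmvi : vi ≤ m := hmax vi hviF
    have hmA : m ∈ A := (List.mem_filter.mp hmem).1
    have hvm : m < v := by have := (List.mem_filter.mp hmem).2; simpa using this
    have : ¬ (vi < m ∧ m < v) := h m hmA
    have : m ≤ vi := by omega
    have : m = vi := le_antisymm this hmvi
    rw [hm, this]
  · intro h x hx hbx
    have := PySem.List.max?_isMax h x (by simp [List.mem_filter, hx, hbx.2])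
    simp at this
    omega

lemma pv_up_ne (A : List Int) (v vi : Int) (h : ¬ v < vi) :
    PySem.List.min? (A.filter fun x => decide (v < x)) (fun x => x) ≠ some vi := by
  intro hm
  have := PySem.List.min?_mem hm
  have := (List.mem_filter.mp this).2
  simp at this; omega

lemma pv_down_ne (A : List Int) (v vi : Int) (h : ¬ vi < v) :
    PySem.List.max? (A.filter fun x => decide (x < v)) (fun x => x) ≠ some vi := by
  intro hm
  have := PySem.List.max?_mem hm
  have := (List.mem_filter.mp this).2
  simp at this; omega

-- index-level 'some j is bad' iff value-level 'some element lies strictly between'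
lemma pv_bad_iff (A : List Int) (s i : Int) :
    (∃ j ∈ PySem.List.pyRange 0 (A.length : Int) 1,
        ((PySem.List.pyGetD A s 0 < PySem.List.pyGetD A i 0 ∧
           (((PySem.List.pyGetD A s 0 < PySem.List.pyGetD A j 0 ∧
              PySem.List.pyGetD A j 0 < PySem.List.pyGetD A i 0) ∧
             PySem.List.pyGetD A s 0 ≠ PySem.List.pyGetD A j 0) ∧ j ≠ i ∧ j ≠ s))
         ∨ (((PySem.List.pyGetD A s 0 > PySem.List.pyGetD A j 0 ∧
              PySem.List.pyGetD A j 0 > PySem.List.pyGetD A i 0) ∧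
             PySem.List.pyGetD A s 0 ≠ PySem.List.pyGetD A j 0) ∧ j ≠ i ∧ j ≠ s)))
    ↔ (∃ x ∈ A, (PySem.List.pyGetD A s 0 < x ∧ x < PySem.List.pyGetD A i 0) ∨
                (PySem.List.pyGetD A i 0 < x ∧ x < PySem.List.pyGetD A s 0)) := by
  set v := PySem.List.pyGetD A s 0 with hv
  set vi := PySem.List.pyGetD A i 0 with hvi
  constructor
  · rintro ⟨j, hjr, hbad⟩
    have hjb : 0 ≤ j ∧ j < (A.length : Int) := (PySem.List.mem_pyRange_one.mp hjr).imp id id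
    refine ⟨PySem.List.pyGetD A j 0, PySem.List.pyGetD_mem A 0 (by simp [PySem.Raise.InRange]; omega), ?_⟩
    rcases hbad with ⟨_, ⟨⟨h1, _⟩, _⟩⟩ | ⟨⟨h1, _⟩, _⟩
    · exact Or.inl h1
    · exact Or.inr ⟨h1.2, h1.1⟩
  · rintro ⟨x, hxA, hbet⟩
    obtain ⟨k, hk, hkx⟩ := List.mem_iff_getElem.mp hxA
    have hjx : PySem.List.pyGetD A (k : Int) 0 = x := by
      rw [PySem.List.pyGetD_natCast, List.getD_eq_getElem?_getD, List.getElem?_eq_getElem hk, hkx]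
      rfl
    refine ⟨(k : Int), PySem.List.mem_pyRange_one.mpr ⟨by positivity, by exact_mod_cast hk⟩, ?_⟩
    have hne_i : (k : Int) ≠ i := by
      intro he; rw [he] at hjx; rw [← hvi] at hjx; omega
    have hne_s : (k : Int) ≠ s := by
      intro he; rw [he] at hjx; rw [← hv] at hjx; omega
    rcases hbet with ⟨h1, h2⟩ | ⟨h1, h2⟩
    · exact Or.inl ⟨by omega, ⟨⟨by omega, by omega⟩, by omega⟩, hne_i, hne_s⟩
    · exact Or.inr ⟨⟨⟨by omega, by omega⟩, by omega⟩, hne_i, hne_s⟩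

lemma pv_pred_eq (A : List Int) (s i : Int) (hi : PySem.Raise.InRange A.length i) :
    (decide (PySem.List.pyGetD A s 0 ≠ PySem.List.pyGetD A i 0) &&
      (PySem.List.pyRange 0 (A.length : Int) 1).all (fun j =>
        !decide ((PySem.List.pyGetD A s 0 < PySem.List.pyGetD A i 0 ∧
             (((PySem.List.pyGetD A s 0 < PySem.List.pyGetD A j 0 ∧
                PySem.List.pyGetD A j 0 < PySem.List.pyGetD A i 0) ∧
               PySem.List.pyGetD A s 0 ≠ PySem.List.pyGetD A j 0) ∧ j ≠ i ∧ j ≠ s))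
          ∨ (((PySem.List.pyGetD A s 0 > PySem.List.pyGetD A j 0 ∧
               PySem.List.pyGetD A j 0 > PySem.List.pyGetD A i 0) ∧
              PySem.List.pyGetD A s 0 ≠ PySem.List.pyGetD A j 0) ∧ j ≠ i ∧ j ≠ s))))
    = (decide (some (PySem.List.pyGetD A i 0) =
         PySem.List.min? (A.filter fun x => decide (PySem.List.pyGetD A s 0 < x)) (fun x => x)) ||
       decide (some (PySem.List.pyGetD A i 0) =
         PySem.List.max? (A.filter fun x => decide (x < PySem.List.pyGetD A s 0)) (fun x => x))) := by
  set v := PySem.List.pyGetD A s 0 with hv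
  set vi := PySem.List.pyGetD A i 0 with hvi
  have hviA : vi ∈ A := PySem.List.pyGetD_mem A 0 hi
  rw [Bool.eq_iff_iff]
  simp only [Bool.and_eq_true, Bool.or_eq_true, decide_eq_true_eq, List.all_eq_true,
    Bool.not_eq_true', decide_eq_false_iff_not]
  have hbad := pv_bad_iff A s i
  rw [← hv, ← hvi] at hbad
  rcases lt_trichotomy v vi with h | h | h
  · constructor
    · rintro ⟨-, hall⟩
      left
      rw [eq_comm, ← pv_adjacent_iff_up A v vi hviA h]
      intro x hx hbx
      have hno : ¬ ∃ x ∈ A, (v < x ∧ x < vi) ∨ (vi < x ∧ x < v) := by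
        rw [← hbad]
        rintro ⟨j, hj, hb⟩
        exact hall j hj hb
      exact hno ⟨x, hx, Or.inl hbx⟩
    · rintro (hup | hdn)
      · refine ⟨by omega, ?_⟩
        rw [eq_comm, ← pv_adjacent_iff_up A v vi hviA h] at hup
        intro j hj hbadj
        have : ∃ x ∈ A, (v < x ∧ x < vi) ∨ (vi < x ∧ x < v) := hbad.mp ⟨j, hj, hbadj⟩
        obtain ⟨x, hx, hb⟩ := this
        rcases hb with hb | hb
        · exact hup x hx hb
        · omega
      · exact absurd hdn.symm (pv_down_ne A v vi (by omega))
  · constructor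
    · rintro ⟨hne, -⟩; omega
    · rintro (hup | hdn)
      · exact absurd hup.symm (pv_up_ne A v vi (by omega))
      · exact absurd hdn.symm (pv_down_ne A v vi (by omega))
  · constructor
    · rintro ⟨-, hall⟩
      right
      rw [eq_comm, ← pv_adjacent_iff_down A v vi hviA h]
      intro x hx hbx
      have hno : ¬ ∃ x ∈ A, (v < x ∧ x < vi) ∨ (vi < x ∧ x < v) := by
        rw [← hbad]
        rintro ⟨j, hj, hb⟩
        exact hall j hj hb
      exact hno ⟨x, hx, Or.inr hbx⟩
    · rintro (hup | hdn)
      · exact absurd hup.symm (pv_up_ne A v vi (by omega))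
      · refine ⟨by omega, ?_⟩
        rw [eq_comm, ← pv_adjacent_iff_down A v vi hviA h] at hdn
        intro j hj hbadj
        obtain ⟨x, hx, hb⟩ := hbad.mp ⟨j, hj, hbadj⟩
        rcases hb with hb | hb
        · omega
        · exact hdn x hx hb

lemma pv_dist (s i : Int) : getDistance s i = |s - i| := by
  show (if s - i ≥ 0 then s - i else -1 * (s - i)) = |s - i|
  split
  · exact (abs_of_nonneg (by omega)).symm
  · rw [abs_of_neg (by omega)]; ring

-- ===== VERDICT (by name: the statement is the Claim_ definition above) =====
theorem getClosestAdjacent_spec : Claim_equal_getClosestAdjacent := by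
  intro A s _ hpre
  show getClosestAdjacent A s = getClosestAdjacent_alt A s
  simp only [getClosestAdjacent, getClosestAdjacent_alt]
  by_cases hlen : (A.length : Int) ≤ s + 1
  · rw [PySem.List.pyRange_one_eq_nil hlen]
    simp only [List.foldl_nil]
    rw [if_pos (by omega)]
  · push Not at hlen
    have hs : -(A.length : Int) ≤ s := by
      rcases hpre with h | h
      · exact h
      · omega
    rw [if_neg (by omega)]
    have hcongr : ∀ (acc : List String) (i : Int), i ∈ PySem.List.pyRange (s + 1) (A.length : Int) 1 →
        (if PySem.List.pyGetD A s 0 ≠ PySem.List.pyGetD A i 0 then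
          (if ((PySem.List.pyRange 0 (A.length : Int) 1).foldl (fun isAdjacent j =>
                if ((PySem.List.pyGetD A s 0 > PySem.List.pyGetD A j 0 ∧
                     PySem.List.pyGetD A j 0 > PySem.List.pyGetD A i 0) ∧
                    PySem.List.pyGetD A s 0 ≠ PySem.List.pyGetD A j 0) ∧
                   j ≠ i ∧ j ≠ s then false
                else
                  if PySem.List.pyGetD A s 0 < PySem.List.pyGetD A i 0 then
                    if ((PySem.List.pyGetD A s 0 < PySem.List.pyGetD A j 0 ∧
                         PySem.List.pyGetD A j 0 < PySem.List.pyGetD A i 0) ∧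
                        PySem.List.pyGetD A s 0 ≠ PySem.List.pyGetD A j 0) ∧
                       j ≠ i ∧ j ≠ s then false else isAdjacent
                  else isAdjacent) true) = true then
            acc ++ [PySem.Int.toStr s ++ "," ++ PySem.Int.toStr i ++ "," ++
                    PySem.Int.toStr (getDistance s i)]
          else acc)
        else acc)
        = (if (decide (some (PySem.List.pyGetD A i 0) =
                 PySem.List.min? (A.filter fun x => decide (PySem.List.pyGetD A s 0 < x)) (fun x => x)) ||
               decide (some (PySem.List.pyGetD A i 0) =
                 PySem.List.max? (A.filter fun x => decide (x < PySem.List.pyGetD A s 0)) (fun x => x))) then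
            acc ++ [PySem.Int.toStr s ++ "," ++ PySem.Int.toStr i ++ "," ++
                    PySem.Int.toStr |s - i|]
          else acc) := by
      intro acc i hi
      have hib := PySem.List.mem_pyRange_one.mp hi
      have hir : PySem.Raise.InRange A.length i := by
        simp [PySem.Raise.InRange]; omega
      rw [pv_latch]
      rw [pv_dist]
      have hstep : ∀ (b : Bool) (X : List String),
          (if PySem.List.pyGetD A s 0 ≠ PySem.List.pyGetD A i 0 then
            (if (true && b) then X else acc) else acc)
          = (if (decide (PySem.List.pyGetD A s 0 ≠ PySem.List.pyGetD A i 0) && b) then X else acc) := by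
        intro b X
        by_cases h : PySem.List.pyGetD A s 0 ≠ PySem.List.pyGetD A i 0 <;> cases b <;> simp [h]
      rw [hstep]
      rw [pv_pred_eq A s i hir]
    refine Eq.trans (PySem.List.foldl_congr_mem _ _ _ _ hcongr) ?_
    rw [PySem.List.foldl_append_if]
    simp
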